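-- pv_equiv track=rewrite | github.com/BeginnerA234/codewars | задача_6_7kyu.py | solve
-- ===== SOURCE A (Python) =====
-- def solve(st):
--      # return "".join(sorted(st.lower())) in "abcdefghijklmnopqrstuvwxyz"
--     st = st.lower()
--     st = list(st) and sorted(st)
--
--     st_check = 'abcdefghijklmnopqrstuvwxyz'
--     st_check = list(st_check)
--     for i in range(len(st_check)-len(st)+1):
--         if st_check[i:i+len(st)] == st:
--             return True
--     return False
-- ===== SOURCE B (Python) =====
-- def solve(st):
--     s = sorted(st.lower())
--     if not s:
--         return True
--     return s[0] >= 'a' and s[-1] <= 'z' and all(ord(b) - ord(a) == 1 for a, b in zip(s, s[1:]))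
-- ===== Notes on version B (the rewrite author's own statement) =====
-- stated objective: simpler
-- what changed: Instead of comparing the sorted lowercased string against every length-matching window of the alphabet, B checks the sorted characters directly: empty is True, otherwise first >= 'a', last <= 'z', and each adjacent pair of character codes differs by exactly 1.
import Mathlib
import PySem

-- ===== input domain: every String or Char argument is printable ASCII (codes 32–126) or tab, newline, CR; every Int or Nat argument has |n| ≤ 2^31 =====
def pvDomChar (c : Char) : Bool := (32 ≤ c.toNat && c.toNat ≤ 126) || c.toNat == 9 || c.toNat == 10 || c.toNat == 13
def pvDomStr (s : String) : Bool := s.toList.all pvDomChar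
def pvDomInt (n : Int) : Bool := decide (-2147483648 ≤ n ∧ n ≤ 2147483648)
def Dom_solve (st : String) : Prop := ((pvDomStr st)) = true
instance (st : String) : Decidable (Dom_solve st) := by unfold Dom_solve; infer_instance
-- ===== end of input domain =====

-- B checks the sorted lowercased characters directly for a consecutive a–z run (first ≥ 'a', last ≤ 'z', adjacent codes differing by 1) instead of comparing against every window of the alphabet; objective: simpler.

-- ===== PORT A =====
def solve (st : String) : Bool :=
  let s0 := (PySem.Str.lower st).toList
  let s := if s0 = [] then [] else PySem.List.sorted s0 (fun c => c) false
  let stCheck := "abcdefghijklmnopqrstuvwxyz".toList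
  (PySem.List.pyRange 0 ((stCheck.length : Int) - (s.length : Int) + 1) 1).any
    (fun i => PySem.List.slice stCheck (some i) (some (i + (s.length : Int))) == s)

-- ===== PORT B =====
def solve_alt (st : String) : Bool :=
  let s := PySem.List.sorted (PySem.Str.lower st).toList (fun c => c) false
  match s with
  | [] => true
  | c :: rest =>
      decide ('a' ≤ c) &&
      decide (PySem.List.pyGetD (c :: rest) (-1) c ≤ 'z') &&
      ((c :: rest).zip (PySem.List.slice (c :: rest) (some 1) none)).all
        (fun p => (((p.2.toNat : Int) - (p.1.toNat : Int)) == 1))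

-- ===== PRECONDITION & SPEC =====
def Spec_solve (st : String) (out : Bool) : Prop := out = solve_alt st
instance (st : String) (out : Bool) : Decidable (Spec_solve st out) := by unfold Spec_solve; infer_instance

-- ===== CLAIM =====
def Claim_equal_solve : Prop := ∀ (st : String), Dom_solve st → Spec_solve st (solve st)

-- ===== LEMMAS AND PROOFS =====

-- proof-only helpers: the two post-sort checks applied to an arbitrary list, and the
-- alphabet segment of length n starting at letter index k
def pvAlpha : List Char := "abcdefghijklmnopqrstuvwxyz".toList

def pvSeg (k n : Nat) : List Char := (List.range n).map (fun j => Char.ofNat (97 + k + j))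

def pvLoop (s : List Char) : Bool :=
  (PySem.List.pyRange 0 ((pvAlpha.length : Int) - (s.length : Int) + 1) 1).any
    (fun i => PySem.List.slice pvAlpha (some i) (some (i + (s.length : Int))) == s)

def pvAlt (s : List Char) : Bool :=
  match s with
  | [] => true
  | c :: rest =>
      decide ('a' ≤ c) &&
      decide (PySem.List.pyGetD (c :: rest) (-1) c ≤ 'z') &&
      ((c :: rest).zip (PySem.List.slice (c :: rest) (some 1) none)).all
        (fun p => (((p.2.toNat : Int) - (p.1.toNat : Int)) == 1))

lemma pv_char_le_iff (a b : Char) : (a ≤ b) ↔ a.toNat ≤ b.toNat := by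
  rw [Char.le_def]; exact UInt32.le_iff_toNat_le

lemma pv_char_eq_of_toNat (a b : Char) (h : a.toNat = b.toNat) : a = b := by
  have h2 : Char.ofNat a.toNat = Char.ofNat b.toNat := by rw [h]
  simpa [Char.ofNat_toNat] using h2

lemma pv_toNat_ofNat (n : Nat) (h : n < 55296) : (Char.ofNat n).toNat = n := by
  have hv : n.isValidChar := Or.inl h
  simp [Char.ofNat, Char.ofNatAux, Char.toNat, hv]

lemma pv_alpha_len : pvAlpha.length = 26 := rfl

lemma pv_length_seg (k n : Nat) : (pvSeg k n).length = n := by simp [pvSeg]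

lemma pv_alpha_getD : ∀ m, m < 26 → pvAlpha.getD m ' ' = Char.ofNat (97 + m) := by decide

lemma pv_alpha_getElem (m : Nat) (h : m < 26) :
    pvAlpha[m]'(by rw [pv_alpha_len]; exact h) = Char.ofNat (97 + m) := by
  rw [← List.getD_eq_getElem pvAlpha ' ' (by rw [pv_alpha_len]; exact h)]
  exact pv_alpha_getD m h

lemma pv_getElem_seg (k n j : Nat) (h : j < n) :
    (pvSeg k n)[j]'(by simpa [pv_length_seg] using h) = Char.ofNat (97 + k + j) := by
  simp [pvSeg]

lemma pv_drop_take_alpha (k n : Nat) (h : k + n ≤ 26) :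
    (pvAlpha.drop k).take n = pvSeg k n := by
  apply List.ext_getElem
  · simp [pv_alpha_len, pv_length_seg]; omega
  · intro i h1 h2
    have hi : i < n := by simpa [pv_length_seg] using h2
    have hki : k + i < 26 := by omega
    rw [pv_getElem_seg k n i hi]
    rw [List.getElem_take, List.getElem_drop]
    rw [pv_alpha_getElem (k + i) hki]
    ring_nf

lemma pv_zipall_iff (s : List Char) :
    ((s.zip s.tail).all (fun p => (((p.2.toNat : Int) - (p.1.toNat : Int)) == 1))) = true ↔
      ∀ j (h : j + 1 < s.length), (s[j+1]'h).toNat = (s[j]'(by omega)).toNat + 1 := by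
  induction s with
  | nil => simp
  | cons c rest ih =>
    cases rest with
    | nil => simp
    | cons c' t =>
      simp only [List.tail_cons, List.zip_cons_cons, List.all_cons, Bool.and_eq_true, beq_iff_eq]
      rw [List.tail_cons] at ih
      constructor
      · rintro ⟨h1, h2⟩ j hj
        cases j with
        | zero => simpa using (by omega : c'.toNat = c.toNat + 1)
        | succ j =>
          have hj' : j + 1 < (c' :: t).length := by
            simp only [List.length_cons] at hj ⊢; omega
          have := (ih.mp h2) j hj'
          simpa using this
      · intro h
        refine ⟨?_, ih.mpr ?_⟩
        · have := h 0 (by simp)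
          simp at this; omega
        · intro j hj
          have hj' : (j+1) + 1 < (c :: c' :: t).length := by
            simp only [List.length_cons] at hj ⊢; omega
          have := h (j+1) hj'
          simpa using this

lemma pv_loop_iff (s : List Char) :
    pvLoop s = true ↔ ∃ k : Nat, k + s.length ≤ 26 ∧ s = pvSeg k s.length := by
  unfold pvLoop
  rw [List.any_eq_true]
  constructor
  · rintro ⟨i, hmem, heq⟩
    rw [PySem.List.mem_pyRange_one] at hmem
    rw [beq_iff_eq] at heq
    obtain ⟨h0, hlt⟩ := hmem
    refine ⟨i.toNat, by rw [pv_alpha_len] at hlt; omega, ?_⟩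
    have hi : i = (i.toNat : Int) := by omega
    rw [hi] at heq
    rw [show ((i.toNat : Int) + (s.length : Int)) = ((i.toNat + s.length : Nat) : Int) by push_cast; ring] at heq
    rw [PySem.List.slice_natCast] at heq
    rw [show i.toNat + s.length - i.toNat = s.length by omega] at heq
    rw [pv_drop_take_alpha i.toNat s.length (by rw [pv_alpha_len] at hlt; omega)] at heq
    exact heq.symm
  · rintro ⟨k, hk, hs⟩
    refine ⟨(k : Int), ?_, ?_⟩
    · rw [PySem.List.mem_pyRange_one, pv_alpha_len]
      constructor
      · positivity
      · omega
    · rw [beq_iff_eq]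
      rw [show ((k : Int) + (s.length : Int)) = ((k + s.length : Nat) : Int) by push_cast; ring]
      rw [PySem.List.slice_natCast]
      rw [show k + s.length - k = s.length by omega]
      rw [pv_drop_take_alpha k s.length hk]
      exact hs.symm

lemma pv_alt_iff (s : List Char) :
    pvAlt s = true ↔ ∃ k : Nat, k + s.length ≤ 26 ∧ s = pvSeg k s.length := by
  cases hs : s with
  | nil =>
    simp only [pvAlt, List.length_nil]
    constructor
    · intro _; exact ⟨0, by omega, by simp [pvSeg]⟩
    · intro _; trivial
  | cons c rest =>
    have hne : c :: rest ≠ ([] : List Char) := by simp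
    simp only [pvAlt, PySem.List.pyGetD_neg_one _ _ hne, PySem.List.slice_from_one,
      List.tail_cons, Bool.and_eq_true, decide_eq_true_eq]
    rw [show (c :: rest).zip rest = (c :: rest).zip (c :: rest).tail from rfl]
    rw [pv_zipall_iff]
    constructor
    · rintro ⟨⟨ha, hz⟩, hchain⟩
      have key : ∀ j, ∀ (h : j < (c :: rest).length), ((c :: rest)[j]'h).toNat = c.toNat + j := by
        intro j
        induction j with
        | zero => intro h; simp
        | succ j ih =>
          intro h
          rw [hchain j h, ih (by omega)]; omega
      have h97 : 97 ≤ c.toNat := by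
        have : ('a' : Char).toNat = 97 := by decide
        rw [pv_char_le_iff] at ha; omega
      have hlast : ((c :: rest).getLast hne).toNat = c.toNat + ((c :: rest).length - 1) := by
        rw [List.getLast_eq_getElem]
        exact key ((c :: rest).length - 1) (by simp)
      have h122 : c.toNat + ((c :: rest).length - 1) ≤ 122 := by
        have : ('z' : Char).toNat = 122 := by decide
        rw [pv_char_le_iff] at hz; omega
      refine ⟨c.toNat - 97, by simp at h122 ⊢; omega, ?_⟩
      apply List.ext_getElem
      · simp [pv_length_seg]
      · intro j h1 h2
        have hj : j < (c :: rest).length := h1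
        have hval : 97 + (c.toNat - 97) + j < 55296 := by
          simp at hj ⊢; omega
        apply pv_char_eq_of_toNat
        rw [key j hj, pv_getElem_seg _ _ j (by simpa [pv_length_seg] using h2),
          pv_toNat_ofNat _ hval]
        omega
    · rintro ⟨k, hk, hseg⟩
      have hlen : (c :: rest).length = rest.length + 1 := by simp
      have hkey : ∀ j, ∀ (h : j < (c :: rest).length), ((c :: rest)[j]'h).toNat = 97 + k + j := by
        intro j h
        have h' : j < (pvSeg k (c :: rest).length).length := by
          rw [pv_length_seg]; exact h
        rw [List.getElem_of_eq hseg h, pv_getElem_seg _ _ j (by simpa [pv_length_seg] using h')]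
        exact pv_toNat_ofNat _ (by omega)
      have hc : c.toNat = 97 + k := by simpa using hkey 0 (by simp)
      refine ⟨⟨?_, ?_⟩, ?_⟩
      · rw [pv_char_le_iff]
        have : ('a' : Char).toNat = 97 := by decide
        omega
      · rw [pv_char_le_iff]
        have : ('z' : Char).toNat = 122 := by decide
        rw [List.getLast_eq_getElem, hkey ((c :: rest).length - 1) (by simp)]
        omega
      · intro j hj
        rw [hkey (j+1) hj, hkey j (by omega)]; omega

lemma pv_loop_eq_alt (s : List Char) : pvLoop s = pvAlt s := by
  cases h1 : pvLoop s <;> cases h2 : pvAlt s <;> try rfl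
  · exact absurd ((pv_loop_iff s).mpr ((pv_alt_iff s).mp h2)) (by simp [h1])
  · exact absurd ((pv_alt_iff s).mpr ((pv_loop_iff s).mp h1)) (by simp [h2])

lemma pv_sorted_nil : PySem.List.sorted ([] : List Char) (fun c => c) false = [] := rfl

lemma pv_solve_eq (st : String) :
    solve st = pvLoop (PySem.List.sorted (PySem.Str.lower st).toList (fun c => c) false) := by
  by_cases h : PySem.Chars.lower st.toList = [] <;>
    simp [solve, pvLoop, pvAlpha, h, pv_sorted_nil]

-- ===== VERDICT =====
theorem solve_spec : Claim_equal_solve := by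
  intro st _
  unfold Spec_solve
  rw [pv_solve_eq, pv_loop_eq_alt]
  rfl
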